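-- pv_equiv track=rewrite | github.com/flocto/CTFDump | 2024/iCTF/SOLVED/vokram/vm.py | parse
-- ===== SOURCE A (Python) =====
-- def parse(source):
--     program = []
--     for line in source.strip().splitlines():
--         pat, repl = line.split(":", 1)
--         stop = False
--         if len(repl) > 0 and repl[0] == ":":
--             repl = repl[1:]
--             stop = True
--         if ":" in repl:
--             raise ValueError("invalid rule: %r" % line)
--         program.append((pat, repl, stop))
--     return program
-- ===== SOURCE B (Python) =====
-- def parse(source):
--     # Positional parsing: collect the index of every colon in the line, then
--     # classify the rule by that index list (one colon, or two adjacent colons).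
--     def rule(line):
--         cuts = [i for i, c in enumerate(line) if c == ":"]
--         if len(cuts) == 1:
--             return (line[:cuts[0]], line[cuts[0] + 1:], False)
--         if len(cuts) == 2 and cuts[1] == cuts[0] + 1:
--             return (line[:cuts[0]], line[cuts[0] + 2:], True)
--         raise ValueError("invalid rule: %r" % line)
--     return [rule(line) for line in source.strip().splitlines()]
-- ===== Notes on version B (the rewrite author's own statement) =====
-- stated objective: alternative
-- what changed: A splits each line at the first colon and then imperatively strips an optional leading colon from the remainder and scans it for a stray colon; B never splits: it collects the positions of all colons in the line once and classifies the rule by the shape of that position list (a single colon, or two adjacent colons), slicing the line at those positions.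
import Mathlib
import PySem

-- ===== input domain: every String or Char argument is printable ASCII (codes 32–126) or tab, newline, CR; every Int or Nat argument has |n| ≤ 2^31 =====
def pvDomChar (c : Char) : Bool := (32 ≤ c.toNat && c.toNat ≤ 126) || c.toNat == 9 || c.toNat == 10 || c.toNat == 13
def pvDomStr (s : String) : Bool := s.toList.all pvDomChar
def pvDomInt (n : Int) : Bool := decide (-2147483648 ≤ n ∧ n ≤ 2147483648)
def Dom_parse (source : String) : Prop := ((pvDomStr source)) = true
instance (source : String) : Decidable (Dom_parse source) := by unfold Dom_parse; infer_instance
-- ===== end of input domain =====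

-- B replaces A's split-once / strip-leading-colon / residual-scan control flow by collecting the
-- colon positions of the line and classifying the rule by that position list (objective: alternative).

-- ===== PORT A =====
-- body of A's for-loop for one line; none exactly where the Python raises ValueError
def parseLineA (line : String) : Option (String × String × Bool) :=
  match PySem.Str.splitMax? line ":" 1 with
  | some [pat, repl0] =>
    -- stop = False; if len(repl) > 0 and repl[0] == ":": repl = repl[1:]; stop = True
    let st :=
      if 0 < PySem.Str.len repl0 ∧ PySem.Str.pyGet? repl0 0 = some ':' then
        (PySem.Str.slice repl0 (some 1) none, true)
      else (repl0, false)
    if PySem.Str.isIn ":" st.1 then none   -- raise ValueError("invalid rule: %r" % line)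
    else some (pat, st.1, st.2)
  | _ => none   -- unpacking 'pat, repl = line.split(":", 1)' raises ValueError

def parseGoA : List String → List (String × String × Bool) → List (String × String × Bool)
  | [], program => program
  | line :: rest, program =>
    match parseLineA line with
    | some r => parseGoA rest (program ++ [r])
    | none => program   -- Python raises here and returns nothing; excluded by Pre_parse

def parse (source : String) : List (String × String × Bool) :=
  parseGoA (PySem.Str.splitlines (PySem.Str.strip source)) []

-- ===== PORT B =====
-- B's helper 'rule'; none exactly where the Python raises ValueError
def ruleB (line : String) : Option (String × String × Bool) :=
  -- cuts = [i for i, c in enumerate(line) if c == ":"]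
  let cuts := ((PySem.List.enumerate line.toList 0).filter (fun q => q.2 == ':')).map (·.1)
  match cuts with
  | [i] => some (PySem.Str.slice line none (some i), PySem.Str.slice line (some (i + 1)) none, false)
  | [i, j] =>
    if j = i + 1 then
      some (PySem.Str.slice line none (some i), PySem.Str.slice line (some (i + 2)) none, true)
    else none   -- raise ValueError("invalid rule: %r" % line)
  | _ => none   -- raise ValueError("invalid rule: %r" % line)

def parse_alt (source : String) : List (String × String × Bool) :=
  (PySem.Str.splitlines (PySem.Str.strip source)).filterMap ruleB

-- ===== PRECONDITION & SPEC =====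
-- Pre_parse excludes exactly the sources on which A raises ValueError (a rule line with no
-- colon, or with a colon left over after the optional leading ':' of the replacement): it
-- admits every stripped line with exactly one colon, or exactly two adjacent colons.
def Pre_parse (source : String) : Prop :=
  ∀ line ∈ PySem.Str.splitlines (PySem.Str.strip source),
    line.toList.count ':' = 1 ∨ (line.toList.count ':' = 2 ∧ [':', ':'] <:+: line.toList)
instance (source : String) : Decidable (Pre_parse source) := by unfold Pre_parse; infer_instance

def pvWitness_parse : String := "a:b\nc::d"

def Spec_parse (source : String) (out : List (String × String × Bool)) : Prop := out = parse_alt source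
instance (source : String) (out : List (String × String × Bool)) : Decidable (Spec_parse source out) := by unfold Spec_parse; infer_instance

-- ===== CLAIM (what is proved, stated in full; the proofs are below) =====
def Claim_equal_parse : Prop := ∀ (source : String), Dom_parse source → Pre_parse source → Spec_parse source (parse source)

-- ===== LEMMAS AND PROOFS =====

-- splitOnMax.go with budget 0 never splits
theorem goMax_zero :
    ∀ (fuel : Nat) (l cur : List Char) (acc : List (List Char)),
      PySem.Chars.splitOnMax.go [':'] fuel 0 l cur acc = ((cur.reverse ++ l) :: acc).reverse := by
  intro fuel l cur acc
  cases fuel <;> cases l <;> simp [PySem.Chars.splitOnMax.go]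

-- splitOnMax.go with budget 1 splits exactly at the first colon
theorem goMax_one_colon (p : List Char) (hp : ':' ∉ p) :
    ∀ (r : List Char) (fuel : Nat) (cur : List Char) (acc : List (List Char)),
      p.length + 1 ≤ fuel →
      PySem.Chars.splitOnMax.go [':'] fuel 1 (p ++ ':' :: r) cur acc =
        PySem.Chars.splitOnMax.go [':'] (fuel - (p.length + 1)) 0 r [] ((cur.reverse ++ p) :: acc) := by
  induction p with
  | nil =>
    intro r fuel cur acc hf
    obtain ⟨f, rfl⟩ : ∃ f, fuel = f + 1 := ⟨fuel - 1, by omega⟩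
    have hpre : [':'].isPrefixOf (':' :: r) = true := by simp [List.isPrefixOf]
    simp only [List.nil_append, PySem.Chars.splitOnMax.go, hpre]
    simp
  | cons c rest ih =>
    intro r fuel cur acc hf
    obtain ⟨f, rfl⟩ : ∃ f, fuel = f + 1 := ⟨fuel - 1, by omega⟩
    have hc : c ≠ ':' := fun h => hp (h ▸ List.mem_cons_self)
    have hpre : [':'].isPrefixOf (c :: (rest ++ ':' :: r)) = false := by
      simp [List.isPrefixOf]; exact fun h => absurd h.symm hc
    simp only [List.cons_append, PySem.Chars.splitOnMax.go, hpre]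
    rw [ih (fun h => hp (List.mem_cons_of_mem _ h)) r f (c :: cur) acc (by simp at hf ⊢; omega)]
    simp

theorem splitOnMax_one (p r : List Char) (hp : ':' ∉ p) :
    PySem.Chars.splitOnMax (p ++ ':' :: r) [':'] 1 = [p, r] := by
  unfold PySem.Chars.splitOnMax
  rw [if_neg (by omega)]
  simp only [Int.toNat_one]
  rw [goMax_one_colon p hp r _ [] [] (by simp)]
  rw [goMax_zero]
  simp

theorem infix_singleton_iff (a : Char) (l : List Char) : [a] <:+: l ↔ a ∈ l := by
  constructor
  · intro h; exact h.subset List.mem_cons_self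
  · intro h
    obtain ⟨s, t, rfl⟩ := List.append_of_mem h
    exact ⟨s, t, by simp⟩

theorem decomp_one (l : List Char) (h : l.count ':' = 1) :
    ∃ p r, l = p ++ ':' :: r ∧ ':' ∉ p ∧ ':' ∉ r := by
  have hm : ':' ∈ l := by
    rw [← List.count_pos_iff]; omega
  obtain ⟨p, r, rfl⟩ := List.append_of_mem hm
  refine ⟨p, r, rfl, ?_, ?_⟩ <;>
  · rw [← List.count_eq_zero]
    simp [List.count_append] at h ⊢
    omega

theorem decomp_two (l : List Char) (h1 : l.count ':' = 2) (h2 : [':', ':'] <:+: l) :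
    ∃ p r, l = p ++ ':' :: ':' :: r ∧ ':' ∉ p ∧ ':' ∉ r := by
  obtain ⟨s, t, rfl⟩ := h2
  refine ⟨s, t, by simp, ?_, ?_⟩ <;>
  · rw [← List.count_eq_zero]
    simp [List.count_append] at h1 ⊢
    omega

theorem chars_isIn_false (r : List Char) (hr : ':' ∉ r) :
    PySem.Chars.isIn [':'] r = false :=
  (PySem.Chars.isIn_eq_false_iff _ _).mpr (fun h => hr ((infix_singleton_iff _ _).mp h))

theorem str_eq_of_toList {s t : String} (h : s.toList = t.toList) : s = t := by
  have h2 := congrArg String.ofList h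
  rwa [String.ofList_toList, String.ofList_toList] at h2

-- colon-free segments contribute nothing to B's cuts list
theorem filter_enum_nocolon (xs : List Char) (hx : ':' ∉ xs) (s : Int) :
    (PySem.List.enumerate xs s).filter (fun q => q.2 == ':') = [] := by
  rw [List.filter_eq_nil_iff]
  intro q hq
  obtain ⟨k, hk, rfl⟩ := (PySem.List.mem_enumerate_iff _ _ _).mp hq
  simp only [beq_iff_eq]
  intro hc
  exact absurd (hc ▸ xs.getElem_mem hk) hx

theorem cuts_one (p r : List Char) (hp : ':' ∉ p) (hr : ':' ∉ r) :
    (((PySem.List.enumerate (p ++ ':' :: r) 0).filter (fun q => q.2 == ':')).map (·.1)) =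
      [(p.length : Int)] := by
  rw [PySem.List.enumerate_append, List.filter_append, filter_enum_nocolon p hp,
      PySem.List.enumerate_cons]
  simp [filter_enum_nocolon r hr]

theorem cuts_two (p r : List Char) (hp : ':' ∉ p) (hr : ':' ∉ r) :
    (((PySem.List.enumerate (p ++ ':' :: ':' :: r) 0).filter (fun q => q.2 == ':')).map (·.1)) =
      [(p.length : Int), (p.length : Int) + 1] := by
  rw [PySem.List.enumerate_append, List.filter_append, filter_enum_nocolon p hp,
      PySem.List.enumerate_cons, PySem.List.enumerate_cons]
  simp [filter_enum_nocolon r hr]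

-- the two per-line parsers agree (and succeed) on every admitted line
theorem lineA_eq_ruleB (line : String)
    (h : line.toList.count ':' = 1 ∨ (line.toList.count ':' = 2 ∧ [':', ':'] <:+: line.toList)) :
    parseLineA line = ruleB line ∧ (ruleB line).isSome := by
  rcases h with h1 | ⟨h2, hadj⟩
  · obtain ⟨p, r, hl, hp, hr⟩ := decomp_one _ h1
    have hmax : PySem.Str.splitMax? line ":" 1 = some [String.ofList p, String.ofList r] := by
      simp [PySem.Str.splitMax?, PySem.Chars.splitMax?, hl, splitOnMax_one p r hp]
    have hifc : ¬ (0 < r.length ∧ PySem.List.pyGet? r 0 = some ':') := by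
      cases r with
      | nil => intro ⟨hlen, _⟩; simp at hlen
      | cons c r' =>
        intro ⟨_, hget⟩
        have hc : c ≠ ':' := fun hc => hr (hc ▸ List.mem_cons_self)
        simp [PySem.List.pyGet?, PySem.List.pyIdx?] at hget
        exact hc hget
    have hpat : PySem.Str.slice line none (some (p.length : Int)) = String.ofList p := by
      apply str_eq_of_toList
      rw [PySem.Str.toList_slice]
      simp [PySem.Chars.slice_eq_listSlice, PySem.List.slice_to_natCast, hl]
    have hrepl : PySem.Str.slice line (some ((p.length : Int) + 1)) none = String.ofList r := by
      apply str_eq_of_toList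
      rw [PySem.Str.toList_slice]
      have : ((p.length : Int) + 1) = ((p.length + 1 : Nat) : Int) := by push_cast; ring
      have hd : (p ++ ':' :: r).drop (p.length + 1) = r := by
        simp [List.drop_append]
      rw [PySem.Chars.slice_eq_listSlice, hl, this, PySem.List.slice_from_natCast, hd]
      simp
    simp [parseLineA, ruleB, hmax, hifc, hl, cuts_one p r hp hr, hpat, hrepl,
      chars_isIn_false r hr]
  · obtain ⟨p, r, hl, hp, hr⟩ := decomp_two _ h2 hadj
    have hmax : PySem.Str.splitMax? line ":" 1 =
        some [String.ofList p, String.ofList (':' :: r)] := by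
      simp [PySem.Str.splitMax?, PySem.Chars.splitMax?, hl, splitOnMax_one p (':' :: r) hp]
    have hslice : PySem.Str.slice (String.ofList (':' :: r)) (some 1) none = String.ofList r := by
      apply str_eq_of_toList
      rw [PySem.Str.toList_slice]
      simp [PySem.Chars.slice_eq_listSlice, PySem.List.slice_from_one]
    have hpat : PySem.Str.slice line none (some (p.length : Int)) = String.ofList p := by
      apply str_eq_of_toList
      rw [PySem.Str.toList_slice]
      simp [PySem.Chars.slice_eq_listSlice, PySem.List.slice_to_natCast, hl]
    have hrepl : PySem.Str.slice line (some ((p.length : Int) + 2)) none = String.ofList r := by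
      apply str_eq_of_toList
      rw [PySem.Str.toList_slice]
      have : ((p.length : Int) + 2) = ((p.length + 2 : Nat) : Int) := by push_cast; ring
      have hd : (p ++ ':' :: ':' :: r).drop (p.length + 2) = r := by
        simp [List.drop_append]
      rw [PySem.Chars.slice_eq_listSlice, hl, this, PySem.List.slice_from_natCast, hd]
      simp
    simp [parseLineA, ruleB, hmax, hslice, hl, cuts_two p r hp hr, hpat, hrepl,
      chars_isIn_false r hr]

theorem parseGoA_eq (lines : List String)
    (h : ∀ line ∈ lines,
      line.toList.count ':' = 1 ∨ (line.toList.count ':' = 2 ∧ [':', ':'] <:+: line.toList)) :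
    ∀ acc, parseGoA lines acc = acc ++ lines.filterMap ruleB := by
  induction lines with
  | nil => intro acc; simp [parseGoA]
  | cons line rest ih =>
    intro acc
    obtain ⟨heq, hsome⟩ := lineA_eq_ruleB line (h line List.mem_cons_self)
    obtain ⟨r, hr⟩ := Option.isSome_iff_exists.mp hsome
    rw [hr] at heq
    simp only [parseGoA, heq]
    rw [ih (fun l hl => h l (List.mem_cons_of_mem _ hl)) (acc ++ [r])]
    simp [hr]

-- ===== VERDICT (by name: the statement is the Claim_ definition above) =====
theorem parse_spec : Claim_equal_parse := by
  intro source _ hpre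
  unfold Spec_parse parse parse_alt
  rw [parseGoA_eq _ hpre]
  simp
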